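-- pv_equiv track=rewrite | github.com/ribo0715/algorithm_solution | 프로그래머스/최솟값 만들기.py | solution
-- ===== SOURCE A (Python) =====
-- def solution(A, B):
--     answer = 0
--
--     A.sort()
--     B.sort()
--
--     for _ in range(len(A)):
--         from_A = A.pop(0)
--         from_B = B.pop(-1)
--
--         answer += from_A * from_B
--
--     return answer
-- ===== SOURCE B (Python) =====
-- def solution(A, B):
--     return sum(a * b for a, b in zip(sorted(A), sorted(B, reverse=True)))
-- ===== Notes on version B (the rewrite author's own statement) =====
-- stated objective: faster
-- what changed: Replace the quadratic loop of A.pop(0)/B.pop(-1) on sorted lists by a single zip of sorted(A) with sorted(B, reverse=True) summed with a generator (no mutation, no repeated front-pops).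
import Mathlib
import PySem

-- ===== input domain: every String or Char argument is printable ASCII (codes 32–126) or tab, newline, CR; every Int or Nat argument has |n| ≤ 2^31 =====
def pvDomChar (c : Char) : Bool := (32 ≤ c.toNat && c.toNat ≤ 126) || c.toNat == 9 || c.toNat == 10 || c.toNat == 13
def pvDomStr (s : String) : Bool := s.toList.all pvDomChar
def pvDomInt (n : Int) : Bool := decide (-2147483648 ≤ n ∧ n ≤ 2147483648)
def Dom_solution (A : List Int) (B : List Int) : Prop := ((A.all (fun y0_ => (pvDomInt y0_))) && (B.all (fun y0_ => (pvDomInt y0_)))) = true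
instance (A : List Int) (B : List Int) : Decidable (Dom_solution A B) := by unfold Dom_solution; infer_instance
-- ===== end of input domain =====

-- B replaces A's quadratic pop(0)/pop(-1) loop by summing zip(sorted(A), sorted(B, reverse=True)) — asymptotically faster.
-- A sorts and empties its arguments in place; the equivalence proved here is about the RETURN value only (B does not mutate).

-- ===== PORT A =====
-- the for-loop over range(len(A)) as fuel recursion on the iteration count;
-- a failing pop (Python IndexError) stops with the current answer — unreachable under Pre_solution
def solutionLoop : Nat → Int → List Int → List Int → Int
  | 0, ans, _, _ => ans
  | n + 1, ans, a, b =>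
    match PySem.List.pop? a 0, PySem.List.pop? b (-1) with
    | some (fromA, a'), some (fromB, b') => solutionLoop n (ans + fromA * fromB) a' b'
    | _, _ => ans

def solution (A : List Int) (B : List Int) : Int :=
  solutionLoop A.length 0 (PySem.List.sorted A (fun x => x)) (PySem.List.sorted B (fun x => x))

-- ===== PORT B =====
def solution_alt (A : List Int) (B : List Int) : Int :=
  (((PySem.List.sorted A (fun x => x)).zip (PySem.List.sorted B (fun x => x) true)).foldl
    (fun s p => s + p.1 * p.2) 0)

-- ===== PRECONDITION & SPEC =====
-- Pre_ excludes exactly the inputs where A raises IndexError: B.pop(-1) on an exhausted B when len(B) < len(A)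
def Pre_solution (A : List Int) (B : List Int) : Prop := A.length ≤ B.length
instance (A : List Int) (B : List Int) : Decidable (Pre_solution A B) := by unfold Pre_solution; infer_instance
def pvWitness_solution : List Int × List Int := ([2, 1], [4, 3])

def Spec_solution (A : List Int) (B : List Int) (out : Int) : Prop := out = solution_alt A B
instance (A : List Int) (B : List Int) (out : Int) : Decidable (Spec_solution A B out) := by unfold Spec_solution; infer_instance

-- ===== CLAIM (what is proved, stated in full; the proofs are below) =====
def Claim_equal_solution : Prop := ∀ (A : List Int) (B : List Int), Dom_solution A B → Pre_solution A B → Spec_solution A B (solution A B)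

-- ===== LEMMAS AND PROOFS =====

-- A's loop on any lists a, b with a.length ≤ b.length is the fold over a zipped with b reversed
theorem solutionLoop_eq_zip (a : List Int) : ∀ (b : List Int) (ans : Int),
    a.length ≤ b.length →
    solutionLoop a.length ans a b = (a.zip b.reverse).foldl (fun s p => s + p.1 * p.2) ans := by
  induction a with
  | nil => intro b ans _; simp [solutionLoop]
  | cons x xs ih =>
    intro b ans h
    have hb : b ≠ [] := by
      intro hnil; subst hnil; simp at h
    have hpopA : PySem.List.pop? (x :: xs) 0 = some (x, xs) := by
      simp [PySem.List.pop?_zero_cons]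
    have hpopB : PySem.List.pop? b (-1) = some (b.getLast hb, b.dropLast) := by
      conv_lhs => rw [← List.dropLast_append_getLast hb]
      exact PySem.List.pop?_last b.dropLast (b.getLast hb)
    have hrev : b.reverse = b.getLast hb :: b.dropLast.reverse := by
      conv_lhs => rw [← List.dropLast_append_getLast hb]
      simp
    have hlen : xs.length ≤ b.dropLast.length := by
      have := List.length_pos_of_ne_nil hb
      simp only [List.length_dropLast]
      simp at h; omega
    simp only [List.length_cons, solutionLoop, hpopA, hpopB, hrev, List.zip_cons_cons,
      List.foldl_cons]
    exact ih b.dropLast (ans + x * b.getLast hb) hlen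

-- sorted(B, reverse=True) on Int with identity key equals the reverse of sorted(B)
theorem sorted_rev_eq_reverse (B : List Int) :
    PySem.List.sorted B (fun x => x) true = (PySem.List.sorted B (fun x => x)).reverse := by
  have h1 : (PySem.List.sorted B (fun x => x) true).Perm ((PySem.List.sorted B (fun x => x)).reverse) := by
    refine (PySem.List.sorted_perm B (fun x => x) true).trans ?_
    exact ((PySem.List.sorted_perm B (fun x => x) false).symm.trans (List.reverse_perm _).symm)
  have p1 : (PySem.List.sorted B (fun x => x) true).Pairwise (fun a b : Int => b ≤ a) := by
    have := PySem.List.sorted_pairwise_rev B (fun x => x)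
    simpa using this
  have p2 : ((PySem.List.sorted B (fun x => x)).reverse).Pairwise (fun a b : Int => b ≤ a) := by
    rw [List.pairwise_reverse]
    have := PySem.List.sorted_pairwise B (fun x => x)
    simpa using this
  exact List.Perm.eq_of_pairwise (fun a b _ _ h h' => le_antisymm h' h) p1 p2 h1

-- ===== VERDICT (by name: the statement is the Claim_ definition above) =====
theorem solution_spec : Claim_equal_solution := by
  intro A B _ hpre
  unfold Spec_solution solution solution_alt
  rw [sorted_rev_eq_reverse]
  have hA : A.length = (PySem.List.sorted A (fun x => x)).length :=
    (PySem.List.length_sorted A (fun x => x) false).symm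
  have hlen : (PySem.List.sorted A (fun x => x)).length ≤ (PySem.List.sorted B (fun x => x)).length := by
    rw [PySem.List.length_sorted, PySem.List.length_sorted]; exact hpre
  rw [hA]
  exact solutionLoop_eq_zip _ _ 0 hlen
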